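-- pv_equiv track=rewrite | github.com/FeanorTheElf/miniprojects-ht | Elliptic Curves/4ii_computations.py | sqrfree_factors
-- ===== SOURCE A (Python) =====
-- def sqrfree_factors(b):
--     pos_factors = [n for n in range(2, b + 1) if b%n == 0]
--     pos_sqrfree_factors = [n
--         for n in pos_factors
--         if len([m for m in pos_factors if n % m**2 == 0]) == 0]
--     return [
--         1, -1,
--         *pos_sqrfree_factors,
--         *[-n for n in pos_sqrfree_factors]
--     ]
-- ===== SOURCE B (Python) =====
-- def sqrfree_factors(b):
--     # radical of b: strip repeated prime factors by trial division up to sqrt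
--     r = b
--     p = 2
--     while p * p <= r:
--         while r % (p * p) == 0:
--             r //= p
--         p += 1
--     # the squarefree factors of b (> 1) are exactly the divisors of r (> 1);
--     # enumerate them in complementary pairs up to sqrt(r)
--     small, large = [], []
--     n = 1
--     while n * n <= r:
--         if r % n == 0:
--             small.append(n)
--             if n * n != r:
--                 large.append(r // n)
--         n += 1
--     divs = [d for d in small + large[::-1] if d > 1]
--     return [1, -1] + divs + [-d for d in divs]
-- ===== Notes on version B (the rewrite author's own statement) =====
-- stated objective: faster
-- what changed: Instead of scanning all n in 2..b and filtering each divisor against the whole divisor list with a quadratic squarefreeness test, B strips repeated prime factors by trial division up to sqrt(b) to obtain the radical of b and then enumerates the radical's divisors in complementary pairs up to sqrt(radical).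
import Mathlib
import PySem

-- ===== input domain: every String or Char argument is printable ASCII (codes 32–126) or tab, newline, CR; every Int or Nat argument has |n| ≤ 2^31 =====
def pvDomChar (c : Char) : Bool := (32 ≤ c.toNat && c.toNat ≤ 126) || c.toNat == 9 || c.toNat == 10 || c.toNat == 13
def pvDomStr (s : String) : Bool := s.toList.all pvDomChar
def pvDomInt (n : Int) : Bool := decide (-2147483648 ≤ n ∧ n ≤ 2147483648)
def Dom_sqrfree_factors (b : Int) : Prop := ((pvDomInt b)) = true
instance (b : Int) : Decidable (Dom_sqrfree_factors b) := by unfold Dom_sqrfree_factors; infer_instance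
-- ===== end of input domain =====

-- B replaces A's scan of all n in 2..b plus a divisor-list squarefreeness filter by:
-- radical of b via trial division up to sqrt(b), then divisor-pair enumeration of the
-- radical up to sqrt(radical) (objective: faster).

-- ===== PORT A =====
def sqrfree_factors (b : Int) : List Int :=
  let pos_factors := (PySem.List.pyRange 2 (b + 1) 1).filter (fun n => PySem.Int.mod b n == 0)
  let pos_sqrfree_factors := pos_factors.filter
    (fun n => (pos_factors.filter (fun m => PySem.Int.mod n (m * m) == 0)).length == 0)
  [1, -1] ++ pos_sqrfree_factors ++ pos_sqrfree_factors.map (fun n => -n)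

-- ===== PORT B =====
-- inner 'while r % (p*p) == 0: r //= p' loop.  The Nat fuel and the '2 ≤ p ∧ 0 < r'
-- part of the guard only make the recursion total: where the Python loop runs it is
-- entered with 2 ≤ p, 0 < r, and each pass divides r by p ≥ 2, so r.toNat steps suffice.
def pvStripGo (p : Int) : Nat → Int → Int
  | 0, r => r
  | fuel + 1, r =>
    if 2 ≤ p ∧ 0 < r ∧ PySem.Int.mod r (p * p) = 0 then
      pvStripGo p fuel (PySem.Int.floordiv r p)
    else r

def pvStrip (r p : Int) : Int := pvStripGo p r.toNat r

-- outer 'while p*p <= r: …; p += 1' loop; fuel (2*r+2-p).toNat bounds the iterations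
-- (p grows each pass and r never grows)
def pvRadGo : Nat → Int → Int → Int
  | 0, r, _ => r
  | fuel + 1, r, p => if p * p ≤ r then pvRadGo fuel (pvStrip r p) (p + 1) else r

def pvRad (r p : Int) : Int := pvRadGo (2 * r + 2 - p).toNat r p

-- divisor-pair loop 'while n*n <= r: …'; fuel (r+1-n).toNat bounds the iterations,
-- and the '1 ≤ n' part of the guard only makes the base case of that bound sound
def pvDivGo (r : Int) : Nat → Int → List Int → List Int → List Int × List Int
  | 0, _, small, large => (small, large)
  | fuel + 1, n, small, large =>
    if 1 ≤ n ∧ n * n ≤ r then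
      if PySem.Int.mod r n = 0 then
        if n * n ≠ r then
          pvDivGo r fuel (n + 1) (small ++ [n]) (large ++ [PySem.Int.floordiv r n])
        else pvDivGo r fuel (n + 1) (small ++ [n]) large
      else pvDivGo r fuel (n + 1) small large
    else (small, large)

def pvDivLoop (r n : Int) (small large : List Int) : List Int × List Int :=
  pvDivGo r (r + 1 - n).toNat n small large

def sqrfree_factors_alt (b : Int) : List Int :=
  let r := pvRad b 2
  let sl := pvDivLoop r 1 [] []
  -- 'small + large[::-1]' : the [::-1] slice is List.reverse (PySem.List.slice?_none_none_neg_one)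
  let divs := (sl.1 ++ sl.2.reverse).filter (fun d => decide (1 < d))
  [1, -1] ++ divs ++ divs.map (fun d => -d)

-- ===== PRECONDITION & SPEC =====
def Spec_sqrfree_factors (b : Int) (out : List Int) : Prop := out = sqrfree_factors_alt b
instance (b : Int) (out : List Int) : Decidable (Spec_sqrfree_factors b out) := by unfold Spec_sqrfree_factors; infer_instance

-- ===== CLAIM (what is proved, stated in full; the proofs are below) =====
def Claim_equal_sqrfree_factors : Prop := ∀ (b : Int), Dom_sqrfree_factors b → Spec_sqrfree_factors b (sqrfree_factors b)

-- ===== LEMMAS AND PROOFS =====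

-- 'n has no square factor m*m with m >= 2'
def SqF (n : Int) : Prop := ∀ m : Int, 2 ≤ m → ¬ (m * m ∣ n)

theorem sqf_natAbs {n : Int} (hn : 0 < n) (hs : SqF n) : Squarefree n.natAbs := by
  intro x hx
  rw [Nat.isUnit_iff]
  by_contra hne
  rcases Nat.lt_or_ge x 2 with h2 | h2
  · interval_cases x
    · simp at hx; omega
    · exact hne rfl
  · apply hs (x : Int) (by exact_mod_cast h2)
    have h3 : ((x * x : Nat) : Int) ∣ (n.natAbs : Int) := Int.natCast_dvd_natCast.mpr hx
    rw [Int.natAbs_of_nonneg (le_of_lt hn)] at h3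
    push_cast at h3
    exact h3

theorem nat_sqf_key (n p k : Nat) (h : Squarefree n) (hd : n ∣ p * p * k) : n ∣ p * k := by
  rcases Nat.eq_zero_or_pos p with rfl | hp
  · simpa using hd
  rcases Nat.eq_zero_or_pos k with rfl | hk
  · simpa using hd
  have hn : n ≠ 0 := h.ne_zero
  rw [← Nat.factorization_le_iff_dvd hn (by positivity)]
  rw [Finsupp.le_def]
  intro q
  by_cases hq : q.Prime
  case neg => simp [Nat.factorization_eq_zero_of_not_prime _ hq]
  by_cases hqn : q ∣ n
  case neg => simp [Nat.factorization_eq_zero_of_not_dvd hqn]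
  have h1 : n.factorization q ≤ 1 := h.natFactorization_le_one q
  have h2 : q ∣ p ∨ q ∣ k := by
    have h3 := (Nat.Prime.dvd_mul hq).mp (hqn.trans hd)
    rcases h3 with h' | h'
    · exact Or.inl (((Nat.Prime.dvd_mul hq).mp h').elim id id)
    · exact Or.inr h'
  rw [Nat.factorization_mul (by omega) (by omega), Finsupp.add_apply]
  rcases h2 with h' | h'
  · have h4 := Nat.Prime.factorization_pos_of_dvd hq (by omega) h'
    omega
  · have h4 := Nat.Prime.factorization_pos_of_dvd hq (by omega) h'
    omega

theorem int_sqf_key (n p k : Int) (hn : 0 < n) (hs : SqF n) (hd : n ∣ p * p * k) :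
    n ∣ p * k := by
  rw [← Int.natAbs_dvd_natAbs] at hd ⊢
  rw [Int.natAbs_mul] at hd ⊢
  rw [Int.natAbs_mul] at hd
  exact nat_sqf_key _ _ _ (sqf_natAbs hn hs) hd

theorem floordiv_pos_of_dvd (r p : Int) (hp : 0 < p) (hd : p ∣ r) (hr : 0 < r) :
    0 < PySem.Int.floordiv r p := by
  rw [PySem.Int.floordiv_eq_ediv_of_pos hp]
  have heq : r / p * p = r := Int.ediv_mul_cancel hd
  nlinarith [heq]

-- one strip step decreases r.toNat (fuel sufficiency for pvStripGo)
theorem pvStripDec (r p : Int) (h : 2 ≤ p ∧ 0 < r ∧ PySem.Int.mod r (p * p) = 0) :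
    (PySem.Int.floordiv r p).toNat < r.toNat := by
  have hdvd : (p * p) ∣ r := (PySem.Int.mod_eq_zero_iff_dvd r (p * p)).mp h.2.2
  have hp : (0:Int) < p := by omega
  have hpr : p ∣ r := dvd_trans (dvd_mul_right p p) hdvd
  rw [PySem.Int.floordiv_eq_ediv_of_pos hp]
  have heq : r / p * p = r := Int.ediv_mul_cancel hpr
  have h1 : r / p < r := by nlinarith [h.2.1]
  have h2 : 0 ≤ r / p := Int.ediv_nonneg (by omega) (by omega)
  omega

theorem pvStripGo_dvd (p : Int) : ∀ (f : Nat) (r : Int), pvStripGo p f r ∣ r := by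
  intro f
  induction f with
  | zero => intro r; exact dvd_refl r
  | succ f ih =>
    intro r
    simp only [pvStripGo]
    split_ifs with h
    · have hdvd : (p * p) ∣ r := (PySem.Int.mod_eq_zero_iff_dvd r (p * p)).mp h.2.2
      have hp0 : (0:Int) < p := by omega
      have hpr : p ∣ r := dvd_trans (dvd_mul_right p p) hdvd
      have h2 : PySem.Int.floordiv r p ∣ r := by
        rw [PySem.Int.floordiv_eq_ediv_of_pos hp0]
        exact ⟨p, (Int.ediv_mul_cancel hpr).symm⟩
      exact dvd_trans (ih _) h2
    · exact dvd_refl r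

theorem pvStripGo_pos (p : Int) : ∀ (f : Nat) (r : Int), 0 < r → 0 < pvStripGo p f r := by
  intro f
  induction f with
  | zero => intro r hr; exact hr
  | succ f ih =>
    intro r hr
    simp only [pvStripGo]
    split_ifs with h
    · have hdvd : (p * p) ∣ r := (PySem.Int.mod_eq_zero_iff_dvd r (p * p)).mp h.2.2
      exact ih _ (floordiv_pos_of_dvd r p (by omega) (dvd_trans (dvd_mul_right p p) hdvd) hr)
    · exact hr

theorem pvStripGo_not_sqdvd (p : Int) (hp : 2 ≤ p) :
    ∀ (f : Nat) (r : Int), 0 < r → r.toNat ≤ f → ¬ (p * p ∣ pvStripGo p f r) := by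
  intro f
  induction f with
  | zero => intro r hr hf; omega
  | succ f ih =>
    intro r hr hf
    simp only [pvStripGo]
    split_ifs with h
    · have hdvd : (p * p) ∣ r := (PySem.Int.mod_eq_zero_iff_dvd r (p * p)).mp h.2.2
      have hdec := pvStripDec r p h
      exact ih _ (floordiv_pos_of_dvd r p (by omega) (dvd_trans (dvd_mul_right p p) hdvd) hr)
        (by omega)
    · intro hdvd
      exact h ⟨hp, hr, (PySem.Int.mod_eq_zero_iff_dvd r (p * p)).mpr hdvd⟩

theorem pvStripGo_dvd_of_sqf (p n : Int) (hn : 0 < n) (hs : SqF n) :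
    ∀ (f : Nat) (r : Int), n ∣ r → n ∣ pvStripGo p f r := by
  intro f
  induction f with
  | zero => intro r hd; exact hd
  | succ f ih =>
    intro r hd
    simp only [pvStripGo]
    split_ifs with h
    · apply ih
      have hdvd : (p * p) ∣ r := (PySem.Int.mod_eq_zero_iff_dvd r (p * p)).mp h.2.2
      have hp0 : (0:Int) < p := by omega
      have hk : p * p * (r / (p * p)) = r := Int.mul_ediv_cancel' hdvd
      have h2 : n ∣ p * p * (r / (p * p)) := by rw [hk]; exact hd
      have h3 : n ∣ p * (r / (p * p)) := int_sqf_key n p _ hn hs h2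
      have h4 : PySem.Int.floordiv r p = p * (r / (p * p)) := by
        rw [PySem.Int.floordiv_eq_ediv_of_pos hp0]
        conv_lhs => rw [← hk]
        rw [mul_assoc, Int.mul_ediv_cancel_left _ (by omega : p ≠ 0)]
      rw [h4]
      exact h3
    · exact hd

theorem pvStripGo_le (p : Int) : ∀ (f : Nat) (r : Int), pvStripGo p f r ≤ r := by
  intro f
  induction f with
  | zero => intro r; exact le_refl r
  | succ f ih =>
    intro r
    simp only [pvStripGo]
    split_ifs with h
    · have hp0 : (0:Int) < p := by omega
      have hle : PySem.Int.floordiv r p ≤ r := by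
        rw [PySem.Int.floordiv_eq_ediv_of_pos hp0]
        exact Int.ediv_le_self p (le_of_lt h.2.1)
      exact le_trans (ih _) hle
    · exact le_refl r

theorem pvStrip_dvd (r p : Int) : pvStrip r p ∣ r := pvStripGo_dvd p r.toNat r

theorem pvStrip_pos (r p : Int) (hr : 0 < r) : 0 < pvStrip r p := pvStripGo_pos p r.toNat r hr

theorem pvStrip_not_sqdvd (r p : Int) (hp : 2 ≤ p) (hr : 0 < r) :
    ¬ (p * p ∣ pvStrip r p) := pvStripGo_not_sqdvd p hp r.toNat r hr (le_refl _)

theorem pvStrip_dvd_of_sqf (r p n : Int) (hn : 0 < n) (hs : SqF n) (hd : n ∣ r) :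
    n ∣ pvStrip r p := pvStripGo_dvd_of_sqf p n hn hs r.toNat r hd

theorem pvStrip_le_self (r p : Int) : pvStrip r p ≤ r := pvStripGo_le p r.toNat r

-- one outer step decreases the pvRadGo fuel measure
theorem pvRadDec (r p : Int) (h : p * p ≤ r) :
    (2 * pvStrip r p + 2 - (p + 1)).toNat < (2 * r + 2 - p).toNat := by
  have h1 : pvStrip r p ≤ r := pvStrip_le_self r p
  have h2 : p ≤ r := by nlinarith [sq_nonneg (p - 1), sq_nonneg p]
  have h3 : (0:Int) ≤ r := le_trans (mul_self_nonneg p) h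
  omega

theorem pvRadGo_spec : ∀ (f : Nat) (r p : Int), 1 ≤ r → 2 ≤ p →
    (∀ q : Int, 2 ≤ q → q < p → ¬ (q * q ∣ r)) → (2 * r + 2 - p).toNat ≤ f →
    pvRadGo f r p ∣ r ∧ 1 ≤ pvRadGo f r p ∧ SqF (pvRadGo f r p) ∧
      (∀ n, 0 < n → SqF n → n ∣ r → n ∣ pvRadGo f r p) := by
  intro f
  induction f with
  | zero =>
    intro r p hr hp hinv hf
    simp only [pvRadGo]
    refine ⟨dvd_refl r, hr, ?_, fun n _ _ hd => hd⟩
    intro m hm hd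
    have h1 : m * m ≤ r := Int.le_of_dvd (by omega) hd
    have hmr : m ≤ r := by nlinarith
    have hmp : m < p := by omega
    exact hinv m hm hmp hd
  | succ f ih =>
    intro r p hr hp hinv hf
    simp only [pvRadGo]
    split_ifs with hg
    · have hr0 : (0:Int) < r := by omega
      have hsd : pvStrip r p ∣ r := pvStrip_dvd r p
      have hpos : 0 < pvStrip r p := pvStrip_pos r p hr0
      have hinv' : ∀ q : Int, 2 ≤ q → q < p + 1 → ¬ (q * q ∣ pvStrip r p) := by
        intro q hq hqp hdq
        rcases lt_or_eq_of_le (by omega : q ≤ p) with hlt | rfl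
        · exact hinv q hq hlt (hdq.trans hsd)
        · exact pvStrip_not_sqdvd r q hq hr0 hdq
      have hdec := pvRadDec r p hg
      obtain ⟨d1, d2, d3, d4⟩ := ih (pvStrip r p) (p + 1) (by omega) (by omega) hinv' (by omega)
      exact ⟨d1.trans hsd, d2, d3,
        fun n hn hs hdn => d4 n hn hs (pvStrip_dvd_of_sqf r p n hn hs hdn)⟩
    · refine ⟨dvd_refl r, hr, ?_, fun n _ _ hd => hd⟩
      intro m hm hd
      rcases lt_or_ge m p with hmp | hmp
      · exact hinv m hm hmp hd
      · have h1 : m * m ≤ r := Int.le_of_dvd (by omega) hd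
        have h2 : p * p ≤ m * m := by nlinarith
        linarith

theorem pvRad_spec (r p : Int) (hr : 1 ≤ r) (hp : 2 ≤ p)
    (hinv : ∀ q : Int, 2 ≤ q → q < p → ¬ (q * q ∣ r)) :
    pvRad r p ∣ r ∧ 1 ≤ pvRad r p ∧ SqF (pvRad r p) ∧
      (∀ n, 0 < n → SqF n → n ∣ r → n ∣ pvRad r p) :=
  pvRadGo_spec (2 * r + 2 - p).toNat r p hr hp hinv (le_refl _)

-- ---- A-side characterisation ----

def aPF (b : Int) : List Int :=
  (PySem.List.pyRange 2 (b + 1) 1).filter (fun n => PySem.Int.mod b n == 0)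

def aSF (b : Int) : List Int :=
  (aPF b).filter (fun n => ((aPF b).filter (fun m => PySem.Int.mod n (m * m) == 0)).length == 0)

theorem sqrfree_factors_eq (b : Int) :
    sqrfree_factors b = [1, -1] ++ aSF b ++ (aSF b).map (fun n => -n) := rfl

theorem mem_aPF (b x : Int) : x ∈ aPF b ↔ 2 ≤ x ∧ x ≤ b ∧ x ∣ b := by
  simp only [aPF, List.mem_filter, PySem.List.mem_pyRange_one, beq_iff_eq,
    PySem.Int.mod_eq_zero_iff_dvd]
  constructor
  · rintro ⟨⟨h1, h2⟩, h3⟩; exact ⟨h1, by omega, h3⟩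
  · rintro ⟨h1, h2, h3⟩; exact ⟨⟨h1, by omega⟩, h3⟩

theorem mem_aSF (b x : Int) (hb : 2 ≤ b) : x ∈ aSF b ↔ 2 ≤ x ∧ x ∣ b ∧ SqF x := by
  simp only [aSF, List.mem_filter, beq_iff_eq, List.length_eq_zero_iff,
    List.filter_eq_nil_iff, PySem.Int.mod_eq_zero_iff_dvd]
  constructor
  · rintro ⟨hx, hall⟩
    rw [mem_aPF] at hx
    refine ⟨hx.1, hx.2.2, ?_⟩
    intro m hm hdm
    have hmx : m ∣ x := dvd_trans (dvd_mul_right m m) hdm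
    have hmb : m ∣ b := hmx.trans hx.2.2
    have hmem : m ∈ aPF b := (mem_aPF b m).mpr ⟨hm, Int.le_of_dvd (by omega) hmb, hmb⟩
    exact hall m hmem hdm
  · rintro ⟨h1, h2, h3⟩
    refine ⟨(mem_aPF b x).mpr ⟨h1, Int.le_of_dvd (by omega) h2, h2⟩, ?_⟩
    intro m hm hdm
    rw [mem_aPF] at hm
    exact h3 m hm.1 hdm

theorem pairwise_aSF (b : Int) : (aSF b).Pairwise (· < ·) := by
  exact ((PySem.List.pairwise_lt_pyRange_one 2 (b + 1)).filter _).filter _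

-- ---- B-side characterisation ----

def bDivs (r : Int) : List Int :=
  ((pvDivLoop r 1 [] []).1 ++ (pvDivLoop r 1 [] []).2.reverse).filter (fun d => decide (1 < d))

theorem sqrfree_factors_alt_eq (b : Int) :
    sqrfree_factors_alt b = [1, -1] ++ bDivs (pvRad b 2) ++ (bDivs (pvRad b 2)).map (fun d => -d) := rfl

-- one divisor-loop step decreases the pvDivGo fuel measure
theorem pvDivDec (r n : Int) (h : 1 ≤ n ∧ n * n ≤ r) :
    (r + 1 - (n + 1)).toNat < (r + 1 - n).toNat := by
  have hn : n ≤ r := by nlinarith [sq_nonneg (n - 1)]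
  omega

theorem pvDivGo_mem_fst (r x : Int) : ∀ (f : Nat) (n : Int) (s l : List Int), 1 ≤ n →
    (r + 1 - n).toNat ≤ f →
    (x ∈ (pvDivGo r f n s l).1 ↔ x ∈ s ∨ (n ≤ x ∧ x * x ≤ r ∧ x ∣ r)) := by
  intro f
  induction f with
  | zero =>
    intro n s l hn hf
    simp only [pvDivGo]
    constructor
    · exact fun hx => Or.inl hx
    · rintro (hx | ⟨ha, hb, hc⟩)
      · exact hx
      · exfalso
        have hxx : x ≤ x * x := le_mul_of_one_le_left (by omega) (by omega)
        omega
  | succ f ih =>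
    intro n s l hn hf
    simp only [pvDivGo]
    split_ifs with hg hm hne
    · have hdec := pvDivDec r n hg
      rw [ih (n + 1) (s ++ [n]) _ (by omega) (by omega)]
      have hnr : n ∣ r := (PySem.Int.mod_eq_zero_iff_dvd r n).mp hm
      simp only [List.mem_append, List.mem_singleton]
      constructor
      · rintro ((hx | rfl) | ⟨ha, hb, hc⟩)
        · exact Or.inl hx
        · exact Or.inr ⟨le_refl _, hg.2, hnr⟩
        · exact Or.inr ⟨by omega, hb, hc⟩
      · rintro (hx | ⟨ha, hb, hc⟩)
        · exact Or.inl (Or.inl hx)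
        · by_cases hxn : x = n
          · exact Or.inl (Or.inr hxn)
          · exact Or.inr ⟨by omega, hb, hc⟩
    · have hdec := pvDivDec r n hg
      rw [ih (n + 1) (s ++ [n]) _ (by omega) (by omega)]
      have hnr : n ∣ r := (PySem.Int.mod_eq_zero_iff_dvd r n).mp hm
      simp only [List.mem_append, List.mem_singleton]
      constructor
      · rintro ((hx | rfl) | ⟨ha, hb, hc⟩)
        · exact Or.inl hx
        · exact Or.inr ⟨le_refl _, hg.2, hnr⟩
        · exact Or.inr ⟨by omega, hb, hc⟩
      · rintro (hx | ⟨ha, hb, hc⟩)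
        · exact Or.inl (Or.inl hx)
        · by_cases hxn : x = n
          · exact Or.inl (Or.inr hxn)
          · exact Or.inr ⟨by omega, hb, hc⟩
    · have hdec := pvDivDec r n hg
      rw [ih (n + 1) s l (by omega) (by omega)]
      constructor
      · rintro (hx | ⟨ha, hb, hc⟩)
        · exact Or.inl hx
        · exact Or.inr ⟨by omega, hb, hc⟩
      · rintro (hx | ⟨ha, hb, hc⟩)
        · exact Or.inl hx
        · by_cases hxn : x = n
          · exfalso; subst hxn
            exact hm ((PySem.Int.mod_eq_zero_iff_dvd r x).mpr hc)
          · exact Or.inr ⟨by omega, hb, hc⟩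
    · constructor
      · exact fun hx => Or.inl hx
      · rintro (hx | ⟨ha, hb, hc⟩)
        · exact hx
        · exfalso
          have hcon : ¬ (n * n ≤ r) := fun hcon => hg ⟨hn, hcon⟩
          nlinarith

theorem pvDivGo_mem_snd (r x : Int) : ∀ (f : Nat) (n : Int) (s l : List Int), 1 ≤ n →
    (r + 1 - n).toNat ≤ f →
    (x ∈ (pvDivGo r f n s l).2 ↔
      x ∈ l ∨ (∃ m, n ≤ m ∧ m * m ≤ r ∧ m * m ≠ r ∧ m ∣ r ∧ x = PySem.Int.floordiv r m)) := by
  intro f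
  induction f with
  | zero =>
    intro n s l hn hf
    simp only [pvDivGo]
    constructor
    · exact fun hx => Or.inl hx
    · rintro (hx | ⟨m, hm1, hm2, hm3, hm4, hm5⟩)
      · exact hx
      · exfalso
        have hmm : m ≤ m * m := le_mul_of_one_le_left (by omega) (by omega)
        omega
  | succ f ih =>
    intro n s l hn hf
    simp only [pvDivGo]
    split_ifs with hg hm hne
    · have hdec := pvDivDec r n hg
      rw [ih (n + 1) _ (l ++ [PySem.Int.floordiv r n]) (by omega) (by omega)]
      have hnr : n ∣ r := (PySem.Int.mod_eq_zero_iff_dvd r n).mp hm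
      simp only [List.mem_append, List.mem_singleton]
      constructor
      · rintro ((hx | rfl) | ⟨m, hm1, hm2, hm3, hm4, hm5⟩)
        · exact Or.inl hx
        · exact Or.inr ⟨n, le_refl _, hg.2, hne, hnr, rfl⟩
        · exact Or.inr ⟨m, by omega, hm2, hm3, hm4, hm5⟩
      · rintro (hx | ⟨m, hm1, hm2, hm3, hm4, hm5⟩)
        · exact Or.inl (Or.inl hx)
        · by_cases hmn : m = n
          · subst hmn; exact Or.inl (Or.inr hm5)
          · exact Or.inr ⟨m, by omega, hm2, hm3, hm4, hm5⟩
    · have hdec := pvDivDec r n hg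
      rw [ih (n + 1) _ l (by omega) (by omega)]
      constructor
      · rintro (hx | ⟨m, hm1, hm2, hm3, hm4, hm5⟩)
        · exact Or.inl hx
        · exact Or.inr ⟨m, by omega, hm2, hm3, hm4, hm5⟩
      · rintro (hx | ⟨m, hm1, hm2, hm3, hm4, hm5⟩)
        · exact Or.inl hx
        · by_cases hmn : m = n
          · exfalso; subst hmn; exact hm3 (not_not.mp hne)
          · exact Or.inr ⟨m, by omega, hm2, hm3, hm4, hm5⟩
    · have hdec := pvDivDec r n hg
      rw [ih (n + 1) s l (by omega) (by omega)]
      constructor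
      · rintro (hx | ⟨m, hm1, hm2, hm3, hm4, hm5⟩)
        · exact Or.inl hx
        · exact Or.inr ⟨m, by omega, hm2, hm3, hm4, hm5⟩
      · rintro (hx | ⟨m, hm1, hm2, hm3, hm4, hm5⟩)
        · exact Or.inl hx
        · by_cases hmn : m = n
          · exfalso; subst hmn
            exact hm ((PySem.Int.mod_eq_zero_iff_dvd r m).mpr hm4)
          · exact Or.inr ⟨m, by omega, hm2, hm3, hm4, hm5⟩
    · constructor
      · exact fun hx => Or.inl hx
      · rintro (hx | ⟨m, hm1, hm2, hm3, hm4, hm5⟩)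
        · exact hx
        · exfalso
          have hcon : ¬ (n * n ≤ r) := fun hcon => hg ⟨hn, hcon⟩
          nlinarith

theorem pvDivGo_pair_fst (r : Int) : ∀ (f : Nat) (n : Int) (s l : List Int), 1 ≤ n →
    (∀ y ∈ s, y < n) → s.Pairwise (· < ·) →
    ((pvDivGo r f n s l).1).Pairwise (· < ·) := by
  intro f
  induction f with
  | zero => intro n s l _ _ hps; exact hps
  | succ f ih =>
    intro n s l hn hs hps
    simp only [pvDivGo]
    split_ifs with hg hm hne
    · refine ih (n + 1) (s ++ [n]) _ (by omega) ?_ ?_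
      · intro y hy
        rcases List.mem_append.mp hy with hy | hy
        · have := hs y hy; omega
        · rw [List.mem_singleton] at hy; omega
      · rw [List.pairwise_append]
        exact ⟨hps, List.pairwise_singleton _ _, fun a ha b hb => by
          rw [List.mem_singleton] at hb; subst hb; exact hs a ha⟩
    · refine ih (n + 1) (s ++ [n]) _ (by omega) ?_ ?_
      · intro y hy
        rcases List.mem_append.mp hy with hy | hy
        · have := hs y hy; omega
        · rw [List.mem_singleton] at hy; omega
      · rw [List.pairwise_append]
        exact ⟨hps, List.pairwise_singleton _ _, fun a ha b hb => by
          rw [List.mem_singleton] at hb; subst hb; exact hs a ha⟩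
    · exact ih (n + 1) s l (by omega) (fun y hy => by have := hs y hy; omega) hps
    · exact hps

theorem pvDivGo_pair_snd (r : Int) : ∀ (f : Nat) (n : Int) (s l : List Int), 1 ≤ n →
    (∀ y ∈ l, 1 ≤ y ∧ r < n * y) → l.Pairwise (· > ·) →
    ((pvDivGo r f n s l).2).Pairwise (· > ·) := by
  intro f
  induction f with
  | zero => intro n s l _ _ hpl; exact hpl
  | succ f ih =>
    intro n s l hn hl hpl
    simp only [pvDivGo]
    split_ifs with hg hm hne
    · have hnr : n ∣ r := (PySem.Int.mod_eq_zero_iff_dvd r n).mp hm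
      have hn0 : (0:Int) < n := by omega
      have heq : n * PySem.Int.floordiv r n = r := by
        rw [PySem.Int.floordiv_eq_ediv_of_pos hn0]
        exact Int.mul_ediv_cancel' hnr
      have hr1 : (1:Int) ≤ r := by nlinarith [hg.2]
      have hy1 : 1 ≤ PySem.Int.floordiv r n := by nlinarith [heq]
      refine ih (n + 1) _ (l ++ [PySem.Int.floordiv r n]) (by omega) ?_ ?_
      · intro y hy
        rcases List.mem_append.mp hy with hy | hy
        · obtain ⟨hy1', hy2⟩ := hl y hy
          exact ⟨hy1', by nlinarith⟩
        · rw [List.mem_singleton] at hy; subst hy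
          exact ⟨hy1, by nlinarith [heq]⟩
      · rw [List.pairwise_append]
        refine ⟨hpl, List.pairwise_singleton _ _, fun a ha b hb => ?_⟩
        rw [List.mem_singleton] at hb; subst hb
        obtain ⟨ha1, ha2⟩ := hl a ha
        nlinarith [heq]
    · refine ih (n + 1) _ l (by omega) ?_ hpl
      intro y hy
      obtain ⟨hy1, hy2⟩ := hl y hy
      exact ⟨hy1, by nlinarith⟩
    · refine ih (n + 1) s l (by omega) ?_ hpl
      intro y hy
      obtain ⟨hy1, hy2⟩ := hl y hy
      exact ⟨hy1, by nlinarith⟩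
    · exact hpl

theorem divloop_mem_fst (r n : Int) (s l : List Int) (x : Int) (hn : 1 ≤ n) :
    x ∈ (pvDivLoop r n s l).1 ↔ x ∈ s ∨ (n ≤ x ∧ x * x ≤ r ∧ x ∣ r) :=
  pvDivGo_mem_fst r x (r + 1 - n).toNat n s l hn (le_refl _)

theorem divloop_mem_snd (r n : Int) (s l : List Int) (x : Int) (hn : 1 ≤ n) :
    x ∈ (pvDivLoop r n s l).2 ↔
      x ∈ l ∨ (∃ m, n ≤ m ∧ m * m ≤ r ∧ m * m ≠ r ∧ m ∣ r ∧ x = PySem.Int.floordiv r m) :=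
  pvDivGo_mem_snd r x (r + 1 - n).toNat n s l hn (le_refl _)

theorem snd_facts (r x : Int) (hr : 1 ≤ r) (hx : x ∈ (pvDivLoop r 1 [] []).2) :
    1 ≤ x ∧ r < x * x ∧ x ∣ r := by
  rw [divloop_mem_snd r 1 [] [] x (le_refl 1)] at hx
  rcases hx with hx | ⟨m, hm1, hm2, hm3, hm4, rfl⟩
  · simp at hx
  · have hm0 : (0:Int) < m := by omega
    have heq : m * PySem.Int.floordiv r m = r := by
      rw [PySem.Int.floordiv_eq_ediv_of_pos hm0]
      exact Int.mul_ediv_cancel' hm4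
    set y := PySem.Int.floordiv r m with hy
    have hy1 : 1 ≤ y := by nlinarith [heq]
    have hmm : m * m < r := lt_of_le_of_ne hm2 hm3
    have hmy : m < y := by nlinarith [heq]
    refine ⟨hy1, by nlinarith [heq], ⟨m, by rw [← heq]; ring⟩⟩

theorem mem_bDivs (r x : Int) (hr : 1 ≤ r) : x ∈ bDivs r ↔ 2 ≤ x ∧ x ∣ r := by
  unfold bDivs
  rw [List.mem_filter, List.mem_append, List.mem_reverse]
  simp only [decide_eq_true_eq]
  constructor
  · rintro ⟨hmem, hx1⟩
    refine ⟨by omega, ?_⟩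
    rcases hmem with hmem | hmem
    · rw [divloop_mem_fst r 1 [] [] x (le_refl 1)] at hmem
      rcases hmem with h | ⟨_, _, hd⟩
      · simp at h
      · exact hd
    · exact (snd_facts r x hr hmem).2.2
  · rintro ⟨hx2, hxd⟩
    have hx0 : (0:Int) < x := by omega
    refine ⟨?_, by omega⟩
    by_cases hsq : x * x ≤ r
    · left
      rw [divloop_mem_fst r 1 [] [] x (le_refl 1)]
      exact Or.inr ⟨by omega, hsq, hxd⟩
    · right
      rw [divloop_mem_snd r 1 [] [] x (le_refl 1)]
      right
      have heq : x * (r / x) = r := Int.mul_ediv_cancel' hxd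
      set m := r / x with hmdef
      have hm1 : 1 ≤ m := by nlinarith [heq]
      have hxx : r < x * x := lt_of_not_ge hsq
      have hmx : m < x := by nlinarith [heq]
      have hmm : m * m < r := by nlinarith [heq]
      have hrmx : r = m * x := by rw [← heq]; ring
      refine ⟨m, hm1, le_of_lt hmm, ne_of_lt hmm, ⟨x, hrmx⟩, ?_⟩
      rw [PySem.Int.floordiv_eq_ediv_of_pos (by omega), hrmx,
        Int.mul_ediv_cancel_left _ (by omega)]

theorem pairwise_bDivs (r : Int) (hr : 1 ≤ r) : (bDivs r).Pairwise (· < ·) := by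
  apply List.Pairwise.filter
  rw [List.pairwise_append]
  refine ⟨pvDivGo_pair_fst r _ 1 [] [] (le_refl 1) (by simp) (by simp), ?_, ?_⟩
  · rw [List.pairwise_reverse]
    exact pvDivGo_pair_snd r _ 1 [] [] (le_refl 1) (by simp) (by simp)
  · intro a ha b hb
    rw [divloop_mem_fst r 1 [] [] a (le_refl 1)] at ha
    rcases ha with ha | ⟨ha1, ha2, _⟩
    · simp at ha
    · rw [List.mem_reverse] at hb
      obtain ⟨hb1, hb2, _⟩ := snd_facts r b hr hb
      nlinarith

-- ---- assembly ----

theorem main_eq (b : Int) (hb : 2 ≤ b) : aSF b = bDivs (pvRad b 2) := by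
  obtain ⟨hdvd, hr1, hsqf, hcompl⟩ :=
    pvRad_spec b 2 (by omega) (le_refl 2) (fun q hq hqp => absurd hqp (by omega))
  have hmem : ∀ x, x ∈ aSF b ↔ x ∈ bDivs (pvRad b 2) := by
    intro x
    rw [mem_aSF b x hb, mem_bDivs _ x hr1]
    constructor
    · rintro ⟨h1, h2, h3⟩
      exact ⟨h1, hcompl x (by omega) h3 h2⟩
    · rintro ⟨h1, h2⟩
      exact ⟨h1, h2.trans hdvd, fun m hm hmd => hsqf m hm (hmd.trans h2)⟩
  have hp1 := pairwise_aSF b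
  have hp2 := pairwise_bDivs (pvRad b 2) hr1
  have hperm : (aSF b).Perm (bDivs (pvRad b 2)) := by
    rw [List.perm_ext_iff_of_nodup (hp1.imp ne_of_lt) (hp2.imp ne_of_lt)]
    exact hmem
  exact PySem.List.eq_of_perm_of_pairwise_le_of_injective (fun x => x)
    (fun a b h => h) hperm (hp1.imp le_of_lt) (hp2.imp le_of_lt)

theorem main_all (b : Int) : sqrfree_factors b = sqrfree_factors_alt b := by
  rcases lt_or_ge b 2 with hb | hb
  · rcases lt_or_ge b 1 with hb0 | hb1
    · -- b ≤ 0 : both sides are [1, -1]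
      rw [sqrfree_factors_eq, sqrfree_factors_alt_eq]
      have hA : aPF b = [] := by
        rw [aPF, PySem.List.pyRange_one_eq_nil (by omega)]; rfl
      have hASF : aSF b = [] := by rw [aSF, hA]; rfl
      have hrad : pvRad b 2 = b := by
        have h0 : (2 * b + 2 - 2).toNat = 0 := by omega
        unfold pvRad
        rw [h0]
        rfl
      have hloop : pvDivLoop b 1 [] [] = ([], []) := by
        have h0 : (b + 1 - 1).toNat = 0 := by omega
        unfold pvDivLoop
        rw [h0]
        rfl
      have hB : bDivs (pvRad b 2) = [] := by rw [hrad, bDivs, hloop]; rfl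
      rw [hASF, hB]
    · -- b = 1 : both sides are [1, -1]
      have hb1' : b = 1 := by omega
      subst hb1'
      decide
  · rw [sqrfree_factors_eq, sqrfree_factors_alt_eq, main_eq b hb]

-- ===== VERDICT (by name: the statement is the Claim_ definition above) =====
theorem sqrfree_factors_spec : Claim_equal_sqrfree_factors := by
  intro b _
  unfold Spec_sqrfree_factors
  exact main_all b
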